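-- pv_equiv track=rewrite | github.com/AP-MI-2021/lab-3-RobertAilenei | main.py | secv_same_bit_counts
-- ===== SOURCE A (Python) =====
-- def get_longest_same_bit_counts(lst: list[int]) -> list[int]:
--     # https://stackoverflow.com/questions/9829578/fast-way-of-counting-non-zero-bits-in-positive-integer
--     """
--
--     :param lst: Functia primeste ca parametru o lista de tip int
--     :return: Functia returneaza o lista goala in cazul in care numerele nu au acelasi numar de biti de 1 si lista intreaga daca toate elementele din lista au acelasi numar de biti de 1
--     """
--     first_nr_bit_count = lst[0].bit_count()
--     for start in range(1, len(lst)):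
--         if lst[start].bit_count()!= first_nr_bit_count:
--             return []
--     return lst
--
-- def secv_same_bit_counts(lst: list[int]):
--     lista_secventa = []
--     for start in range(0, len(lst) + 1):
--         for end in range(start + 1, len(lst) + 1):
--             if get_longest_same_bit_counts(lst[start:end]):
--                 lista_secventa.append(lst[start:end])
--
--     max_sec = []
--     for secventa in lista_secventa:
--         if len(secventa) > len(max_sec):
--             max_sec = secventa
--
--     return max_sec
-- ===== SOURCE B (Python) =====
-- def secv_same_bit_counts(lst):
--     # single pass: walk maximal runs of equal bit_count, keep the earliest strictly-longest run
--     def bc(n):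
--         return bin(abs(n)).count('1')
--     best = []
--     rest = lst
--     while rest:
--         c = bc(rest[0])
--         k = 1
--         while k < len(rest) and bc(rest[k]) == c:
--             k += 1
--         if k > len(best):
--             best = rest[:k]
--         rest = rest[k:]
--     return best
-- ===== Notes on version B (the rewrite author's own statement) =====
-- stated objective: faster
-- what changed: Replaced the enumerate-all-slices + filter + first-longest scan (cubic and worse) by a single left-to-right pass over maximal runs of equal bit_count, keeping the earliest strictly longest run.
import Mathlib
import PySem

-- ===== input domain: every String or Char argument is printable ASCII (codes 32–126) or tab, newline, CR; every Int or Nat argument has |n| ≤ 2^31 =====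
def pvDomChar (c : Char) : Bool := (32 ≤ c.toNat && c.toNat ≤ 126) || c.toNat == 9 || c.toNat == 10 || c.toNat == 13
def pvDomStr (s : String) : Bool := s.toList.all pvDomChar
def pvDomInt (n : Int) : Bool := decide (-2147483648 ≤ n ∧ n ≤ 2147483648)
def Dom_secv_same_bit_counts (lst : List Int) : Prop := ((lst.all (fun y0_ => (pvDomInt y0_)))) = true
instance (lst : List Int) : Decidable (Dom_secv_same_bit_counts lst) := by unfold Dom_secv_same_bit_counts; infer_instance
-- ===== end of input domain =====

-- B replaces A's enumerate-all-slices / filter / first-longest scan by one pass over maximal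
-- runs of equal bit_count (objective: faster, asymptotic).

-- ===== PORT A =====
-- helper of A; on [] Python raises IndexError, but secv_same_bit_counts only calls it on
-- nonempty slices, so the [] branch is unreachable from the entry point.
def get_longest_same_bit_counts (lst : List Int) : List Int :=
  match lst with
  | [] => []
  | x :: rest =>
      -- 'for start in range(1, len(lst)): if bc != first: return []' = an all-check on the tail
      if rest.all (fun y => PySem.Int.bitCount y == PySem.Int.bitCount x) then x :: rest else []

def secv_same_bit_counts (lst : List Int) : List Int :=
  let lista_secventa :=
    (PySem.List.pyRange 0 ((lst.length : Int) + 1) 1).foldl (fun acc start =>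
      (PySem.List.pyRange (start + 1) ((lst.length : Int) + 1) 1).foldl (fun acc2 e =>
        if get_longest_same_bit_counts (PySem.List.slice lst (some start) (some e)) ≠ [] then
          acc2 ++ [PySem.List.slice lst (some start) (some e)]
        else acc2) acc) []
  lista_secventa.foldl (fun max_sec secventa =>
    if secventa.length > max_sec.length then secventa else max_sec) []

-- ===== PORT B =====
-- 'while rest:' loop of Source B: head run rest[:k] (k = 1 + length of the matching prefix of the
-- tail), keep it if strictly longer, continue on rest[k:].
def secv_alt_loop (best : List Int) (rest : List Int) : List Int :=
  match rest with
  | [] => best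
  | x :: xs =>
      let p := fun y => PySem.Int.bitCount y == PySem.Int.bitCount x
      let run := x :: xs.takeWhile p
      secv_alt_loop (if run.length > best.length then run else best) (xs.dropWhile p)
termination_by rest.length
decreasing_by
  simpa using Nat.lt_succ_of_le (List.length_dropWhile_le p xs)

def secv_same_bit_counts_alt (lst : List Int) : List Int :=
  secv_alt_loop [] lst

-- ===== PRECONDITION & SPEC =====
def Spec_secv_same_bit_counts (lst : List Int) (out : List Int) : Prop := out = secv_same_bit_counts_alt lst
instance (lst : List Int) (out : List Int) : Decidable (Spec_secv_same_bit_counts lst out) := by unfold Spec_secv_same_bit_counts; infer_instance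

-- ===== CLAIM (what is proved, stated in full; the proofs are below) =====
def Claim_equal_secv_same_bit_counts : Prop := ∀ (lst : List Int), Dom_secv_same_bit_counts lst → Spec_secv_same_bit_counts lst (secv_same_bit_counts lst)

-- ===== LEMMAS AND PROOFS =====

-- the 'keep-if-strictly-longer' step shared by A's final scan and B's loop
def pvStep (m s : List Int) : List Int := if s.length > m.length then s else m

-- length of the maximal uniform-bitcount prefix (1 + matching tail) of a nonempty list
def pvRun : List Int → Nat
  | [] => 0
  | x :: xs => (xs.takeWhile (fun y => PySem.Int.bitCount y == PySem.Int.bitCount x)).length + 1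

-- the nonempty uniform slices starting at position 0, in increasing length (A's inner loop order)
def pvGrp (l : List Int) : List (List Int) := (List.range (pvRun l)).map (fun k => l.take (k + 1))

-- all nonempty uniform slices in A's (start, end) lexicographic order
def pvAllU (lst : List Int) : List (List Int) :=
  (List.range (lst.length + 1)).flatMap (fun s => pvGrp (lst.drop s))

theorem pvRun_le_length (l : List Int) : pvRun l ≤ l.length := by
  cases l with
  | nil => simp [pvRun]
  | cons x xs =>
      simpa [pvRun] using Nat.succ_le_succ (List.IsPrefix.length_le (List.takeWhile_prefix _))

-- generic append-if fold (Prop test)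
theorem pv_foldl_appif {α β : Type} (p : α → Prop) [DecidablePred p] (f : α → β)
    (l : List α) (acc : List β) :
    l.foldl (fun a x => if p x then a ++ [f x] else a) acc
      = acc ++ (l.filter (fun x => decide (p x))).map f := by
  induction l generalizing acc with
  | nil => simp
  | cons x xs ih =>
      by_cases h : p x <;> simp [h, ih]

theorem pv_foldl_append_flatMap {α β : Type} (g : α → List β) (l : List α) (acc : List β) :
    l.foldl (fun a x => a ++ g x) acc = acc ++ l.flatMap g := by
  induction l generalizing acc with
  | nil => simp
  | cons x xs ih => simp [ih]

theorem pv_filter_range_lt (r m : Nat) (h : r ≤ m) :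
    (List.range m).filter (fun k => decide (k < r)) = List.range r := by
  induction m with
  | zero => interval_cases r; simp
  | succ m ih =>
      rcases Nat.lt_or_ge r (m + 1) with h' | h'
      · have hr : r ≤ m := Nat.lt_succ_iff.mp h'
        have : ¬ m < r := by omega
        simp [List.range_succ, List.filter_append, ih hr, this]
      · have hr : r = m + 1 := le_antisymm h h'
        subst hr
        refine List.filter_eq_self.mpr ?_
        intro k hk
        simpa using List.mem_range.mp hk

theorem pv_all_take_iff (p : Int → Bool) (xs : List Int) (k : Nat) (hk : k ≤ xs.length) :
    ((xs.take k).all p = true) ↔ k ≤ (xs.takeWhile p).length := by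
  induction xs generalizing k with
  | nil => simp at hk; simp [hk]
  | cons x xs ih =>
      cases k with
      | zero => simp
      | succ k =>
          have hk' : k ≤ xs.length := by simpa using hk
          by_cases h : p x = true
          · simp [h, List.all_cons, ih k hk']
          · simp [h, List.all_cons]

theorem pv_glsbc_ne_nil_iff (l : List Int) (k : Nat) (hk : k < l.length) :
    (get_longest_same_bit_counts (l.take (k + 1)) ≠ []) ↔ k + 1 ≤ pvRun l := by
  cases l with
  | nil => simp at hk
  | cons x xs =>
      have hk' : k ≤ xs.length := Nat.lt_succ_iff.mp (by simpa using hk)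
      simp only [List.take_succ_cons, get_longest_same_bit_counts, pvRun]
      by_cases h : (xs.take k).all (fun y => PySem.Int.bitCount y == PySem.Int.bitCount x) = true
      · simp [h, (pv_all_take_iff _ xs k (by simpa using hk)).mp h]
      · have := (pv_all_take_iff (fun y => PySem.Int.bitCount y == PySem.Int.bitCount x) xs k (by simpa using hk)).not
        simp [h] at this ⊢
        omega

theorem pv_inner_eq (lst : List Int) (s : Nat) (acc : List (List Int)) :
    (PySem.List.pyRange ((s : Int) + 1) ((lst.length : Int) + 1) 1).foldl (fun acc2 e =>
        if get_longest_same_bit_counts (PySem.List.slice lst (some (s : Int)) (some e)) ≠ [] then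
          acc2 ++ [PySem.List.slice lst (some (s : Int)) (some e)]
        else acc2) acc
    = acc ++ pvGrp (lst.drop s) := by
  rw [PySem.List.pyRange_one]
  have hlen : (((lst.length : Int) + 1) - ((s : Int) + 1)).toNat = lst.length - s := by omega
  rw [hlen, List.foldl_map]
  rw [pv_foldl_appif (fun k : Nat =>
        get_longest_same_bit_counts (PySem.List.slice lst (some (s : Int)) (some ((s : Int) + 1 + (k : Int)))) ≠ [])
      (fun k : Nat => PySem.List.slice lst (some (s : Int)) (some ((s : Int) + 1 + (k : Int))))]
  have hsl : ∀ k : Nat, PySem.List.slice lst (some (s : Int)) (some ((s : Int) + 1 + (k : Int)))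
      = (lst.drop s).take (k + 1) := by
    intro k
    have : (s : Int) + 1 + (k : Int) = (s : Int) + ((k + 1 : Nat) : Int) := by push_cast; ring
    rw [this, PySem.List.slice_natCast_add]
  have hfil : (List.range (lst.length - s)).filter (fun (k : Nat) =>
        decide (get_longest_same_bit_counts (PySem.List.slice lst (some (s : Int)) (some ((s : Int) + 1 + (k : Int)))) ≠ []))
      = List.range (pvRun (lst.drop s)) := by
    rw [List.filter_congr (q := fun k => decide (k < pvRun (lst.drop s))) ?_]
    · exact pv_filter_range_lt _ _ (le_trans (pvRun_le_length _) (by simp))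
    · intro k hk
      have hk' : k < (lst.drop s).length := by simpa using List.mem_range.mp hk
      rw [hsl k]
      simp only [decide_eq_decide]
      rw [pv_glsbc_ne_nil_iff _ _ hk']
      omega
  rw [hfil]
  congr 1
  apply List.map_congr_left
  intro k _
  exact hsl k

-- A's collected list equals pvAllU
theorem pv_lista_eq (lst : List Int) :
    (PySem.List.pyRange 0 ((lst.length : Int) + 1) 1).foldl (fun acc start =>
      (PySem.List.pyRange (start + 1) ((lst.length : Int) + 1) 1).foldl (fun acc2 e =>
        if get_longest_same_bit_counts (PySem.List.slice lst (some start) (some e)) ≠ [] then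
          acc2 ++ [PySem.List.slice lst (some start) (some e)]
        else acc2) acc) []
    = pvAllU lst := by
  rw [PySem.List.pyRange_one]
  have hlen : (((lst.length : Int) + 1) - 0).toNat = lst.length + 1 := by omega
  rw [hlen, List.foldl_map]
  have h1 := PySem.List.foldl_congr_mem (List.range (lst.length + 1))
      (fun (x : List (List Int)) (y : Nat) =>
        (PySem.List.pyRange (0 + (y : Int) + 1) ((lst.length : Int) + 1) 1).foldl
          (fun acc2 e =>
            if get_longest_same_bit_counts (PySem.List.slice lst (some (0 + (y : Int))) (some e)) ≠ [] then
              acc2 ++ [PySem.List.slice lst (some (0 + (y : Int))) (some e)]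
            else acc2) x)
      (fun acc s => acc ++ pvGrp (lst.drop s)) []
      (fun acc s _ => by simpa using pv_inner_eq lst s acc)
  rw [h1, pv_foldl_append_flatMap]
  simp [pvAllU]

-- fold of pvStep over an increasing-prefix chain
theorem pv_chain_fold (l : List Int) (r : Nat) (hr : r ≤ l.length) :
    ∀ acc, ((List.range r).map (fun k => l.take (k + 1))).foldl pvStep acc
      = if r > acc.length then l.take r else acc := by
  induction r with
  | zero => intro acc; simp
  | succ r ih =>
      intro acc
      have hr' : r ≤ l.length := Nat.le_of_succ_le hr
      rw [List.range_succ, List.map_append, List.foldl_append, ih hr']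
      have hlen1 : (l.take (r + 1)).length = r + 1 := by simp [Nat.min_eq_left hr]
      have hlenr : (l.take r).length = r := by simp [Nat.min_eq_left hr']
      by_cases h : acc.length < r
      · rw [if_pos h, if_pos (Nat.lt_succ_of_lt h)]
        simp only [List.map_cons, List.map_nil, List.foldl_cons, List.foldl_nil, pvStep, hlen1,
          hlenr, gt_iff_lt]
        rw [if_pos (Nat.lt_succ_self r)]
      · rw [if_neg (by omega)]
        simp only [List.map_cons, List.map_nil, List.foldl_cons, List.foldl_nil, pvStep, hlen1,
          gt_iff_lt]

theorem pv_foldl_grp_const (l : List Int) (acc : List Int) (h : pvRun l ≤ acc.length) :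
    (pvGrp l).foldl pvStep acc = acc := by
  have := pv_chain_fold l (pvRun l) (pvRun_le_length l) acc
  simp only [pvGrp] at *
  rw [this]
  simp [Nat.not_lt.mpr h]

theorem pv_takeWhile_dropWhile_nil (p : Int → Bool) (xs : List Int) :
    (xs.dropWhile p).takeWhile p = [] := by
  induction xs with
  | nil => simp
  | cons a l ih =>
      by_cases h : p a = true
      · simpa [h] using ih
      · simp [h]

theorem pv_takeWhile_all_append (p : Int → Bool) (l1 l2 : List Int)
    (h1 : ∀ y ∈ l1, p y = true) (h2 : l2.takeWhile p = []) :
    (l1 ++ l2).takeWhile p = l1 := by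
  induction l1 with
  | nil => rw [List.nil_append]; exact h2
  | cons a l ih =>
      rw [List.cons_append, List.takeWhile_cons, if_pos (h1 a (by simp))]
      rw [ih (fun y hy => h1 y (by simp [hy]))]

-- inside the head run, the uniform prefix of the suffix reaches exactly the end of the run
theorem pv_run_drop (x : Int) (xs : List Int) (p : Int → Bool)
    (hp : p = fun y => PySem.Int.bitCount y == PySem.Int.bitCount x) (s : Nat)
    (hs : s ≤ (xs.takeWhile p).length) :
    pvRun ((x :: xs).drop s) = (xs.takeWhile p).length + 1 - s := by
  subst hp
  cases s with
  | zero => simp [pvRun]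
  | succ s' =>
      have hs' : s' < (xs.takeWhile (fun y => PySem.Int.bitCount y == PySem.Int.bitCount x)).length := by
        omega
      have hdrop : (x :: xs).drop (s' + 1)
          = (xs.takeWhile (fun y => PySem.Int.bitCount y == PySem.Int.bitCount x)).drop s'
            ++ xs.dropWhile (fun y => PySem.Int.bitCount y == PySem.Int.bitCount x) := by
        rw [List.drop_succ_cons]
        conv_lhs => rw [← List.takeWhile_append_dropWhile
          (p := fun y => PySem.Int.bitCount y == PySem.Int.bitCount x) (l := xs)]
        exact List.drop_append_of_le_length (le_of_lt hs')
      obtain ⟨h, rest, hcons⟩ : ∃ h rest,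
          (xs.takeWhile (fun y => PySem.Int.bitCount y == PySem.Int.bitCount x)).drop s'
            = h :: rest := by
        rcases hd : (xs.takeWhile (fun y => PySem.Int.bitCount y == PySem.Int.bitCount x)).drop s' with _ | ⟨h, rest⟩
        · exfalso
          have := congrArg List.length hd
          simp at this
          omega
        · exact ⟨h, rest, rfl⟩
      have hmem : h ∈ xs.takeWhile (fun y => PySem.Int.bitCount y == PySem.Int.bitCount x) :=
        List.mem_of_mem_drop (by rw [hcons]; exact List.mem_cons_self ..)
      have hb : PySem.Int.bitCount h = PySem.Int.bitCount x := by
        simpa using List.mem_takeWhile_imp hmem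
      have hpp : (fun y => PySem.Int.bitCount y == PySem.Int.bitCount h)
          = (fun y => PySem.Int.bitCount y == PySem.Int.bitCount x) := by
        funext y
        rw [hb]
      have hrest : ∀ y ∈ rest, (PySem.Int.bitCount y == PySem.Int.bitCount x) = true := by
        intro y hy
        have : y ∈ (xs.takeWhile (fun y => PySem.Int.bitCount y == PySem.Int.bitCount x)).drop s' := by
          rw [hcons]
          exact List.mem_cons_of_mem _ hy
        have hy2 := List.mem_of_mem_drop this
        have hy3 := List.mem_takeWhile_imp (p := fun y => PySem.Int.bitCount y == PySem.Int.bitCount x) hy2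
        simpa using hy3
      have hlenr : rest.length
          = (xs.takeWhile (fun y => PySem.Int.bitCount y == PySem.Int.bitCount x)).length - (s' + 1) := by
        have := congrArg List.length hcons
        simp at this
        omega
      rw [hdrop, hcons, List.cons_append]
      simp only [pvRun, hpp]
      rw [pv_takeWhile_all_append _ _ _ hrest (pv_takeWhile_dropWhile_nil _ xs)]
      omega

-- dropping the whole head run leaves the dropWhile suffix
theorem pv_drop_run (x : Int) (xs : List Int) (p : Int → Bool) :
    (x :: xs).drop ((xs.takeWhile p).length + 1) = xs.dropWhile p := by
  rw [List.drop_succ_cons]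
  have h := List.drop_left (l₁ := xs.takeWhile p) (l₂ := xs.dropWhile p)
  rw [List.takeWhile_append_dropWhile] at h
  exact h

-- groups whose run is no longer than the accumulator never change it
theorem pv_foldl_flat_const (f : Nat → List Int) (ss : List Nat) (acc : List Int)
    (h : ∀ s ∈ ss, pvRun (f s) ≤ acc.length) :
    (ss.flatMap (fun s => pvGrp (f s))).foldl pvStep acc = acc := by
  induction ss with
  | nil => simp
  | cons a l ih =>
      rw [List.flatMap_cons, List.foldl_append, pv_foldl_grp_const _ _ (h a (by simp))]
      exact ih (fun s hs => h s (by simp [hs]))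

-- main bridge: folding pvStep over all uniform slices is B's loop
theorem pv_main : ∀ (N : Nat) (l : List Int), l.length ≤ N →
    ∀ acc, (pvAllU l).foldl pvStep acc = secv_alt_loop acc l := by
  intro N
  induction N with
  | zero =>
      intro l hl acc
      have h0 : l = [] := List.eq_nil_of_length_eq_zero (Nat.le_zero.mp hl)
      subst h0
      simp [pvAllU, pvGrp, pvRun, secv_alt_loop]
  | succ N ih =>
      intro l hl acc
      cases l with
      | nil => simp [pvAllU, pvGrp, pvRun, secv_alt_loop]
      | cons x xs =>
          set p := fun y => PySem.Int.bitCount y == PySem.Int.bitCount x with hp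
          have hxslen : xs.length = (xs.takeWhile p).length + (xs.dropWhile p).length := by
            have h := congrArg List.length (List.takeWhile_append_dropWhile (p := p) (l := xs))
            rw [List.length_append] at h
            omega
          have htake : (x :: xs).take ((xs.takeWhile p).length + 1) = x :: xs.takeWhile p := by
            rw [List.take_succ_cons]
            congr 1
            have h := List.take_left (l₁ := xs.takeWhile p) (l₂ := xs.dropWhile p)
            rw [List.takeWhile_append_dropWhile] at h
            exact h
          have hrun : pvRun (x :: xs) = (xs.takeWhile p).length + 1 := by
            simp [pvRun, hp]
          have hsplit : pvAllU (x :: xs)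
              = (List.range ((xs.takeWhile p).length + 1)).flatMap (fun s => pvGrp ((x :: xs).drop s))
                ++ pvAllU (xs.dropWhile p) := by
            unfold pvAllU
            rw [show (x :: xs).length + 1
                = ((xs.takeWhile p).length + 1) + ((xs.dropWhile p).length + 1) from by
              rw [List.length_cons, hxslen]; omega]
            rw [List.range_add, List.flatMap_append]
            congr 1
            rw [List.flatMap_map]
            apply List.flatMap_congr
            intro s' _
            congr 1
            show (x :: xs).drop ((xs.takeWhile p).length + 1 + s') = (xs.dropWhile p).drop s'
            rw [← pv_drop_run x xs p, List.drop_drop]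
            try congr 1
            try omega
          have hstep : pvStep acc (x :: xs.takeWhile p)
              = if (xs.takeWhile p).length + 1 > acc.length then x :: xs.takeWhile p else acc := by
            simp [pvStep]
          have hsteplen : (xs.takeWhile p).length ≤ (pvStep acc (x :: xs.takeWhile p)).length := by
            rw [hstep]
            by_cases h : (xs.takeWhile p).length + 1 > acc.length
            · simp [h]
            · rw [if_neg h]; omega
          have hfold1 : ((List.range ((xs.takeWhile p).length + 1)).flatMap
                (fun s => pvGrp ((x :: xs).drop s))).foldl pvStep acc
              = pvStep acc (x :: xs.takeWhile p) := by
            rw [List.range_succ_eq_map, List.flatMap_cons, List.foldl_append]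
            have hg : (pvGrp ((x :: xs).drop 0)).foldl pvStep acc
                = pvStep acc (x :: xs.takeWhile p) := by
              rw [List.drop_zero]
              unfold pvGrp
              rw [hrun, pv_chain_fold (x :: xs) ((xs.takeWhile p).length + 1)
                    (by simp [hxslen]) acc]
              rw [htake, hstep]
            rw [hg]
            rw [List.flatMap_map]
            apply pv_foldl_flat_const
            intro s hs
            have hs'' : s < (xs.takeWhile p).length := List.mem_range.mp hs
            show pvRun ((x :: xs).drop (s + 1)) ≤ _
            rw [pv_run_drop x xs p hp (s + 1) (by omega)]
            omega
          rw [hsplit, List.foldl_append, hfold1]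
          have hdlen : (xs.dropWhile p).length ≤ N := by
            have h1 : (xs.dropWhile p).length ≤ xs.length := List.length_dropWhile_le p xs
            have h2 : xs.length ≤ N := by simpa using Nat.succ_le_succ_iff.mp (by simpa using hl)
            omega
          rw [ih (xs.dropWhile p) hdlen (pvStep acc (x :: xs.takeWhile p))]
          conv_rhs => rw [secv_alt_loop]
          simp only [pvStep, ← hp]

-- ===== VERDICT (by name: the statement is the Claim_ definition above) =====
theorem secv_same_bit_counts_spec : Claim_equal_secv_same_bit_counts := by
  intro lst _
  show secv_same_bit_counts lst = secv_same_bit_counts_alt lst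
  unfold secv_same_bit_counts secv_same_bit_counts_alt
  rw [pv_lista_eq lst]
  exact pv_main lst.length lst le_rfl []
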